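-- pv_equiv track=rewrite | github.com/guiccastro/Projeto-FRIDA | sanitizer.py | VerifyLoopings
-- ===== SOURCE A (Python) =====
-- def VerifyLoopings(list_route):
--     list_route.reverse()
--     for route in list(list_route):
--         if(list_route.count(route) > 1):
--             current_route_index = list_route.index(route)
--
--             while(current_route_index < len(list_route)-1):
--                 if(list_route[current_route_index] != list_route[current_route_index+1] and route in list_route[current_route_index+1:]):
--                     return True
--                 current_route_index += 1
--
--     return False
-- ===== SOURCE B (Python) =====
-- def VerifyLoopings(list_route):
--     # same in-place reversal side effect as the original
--     list_route.reverse()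
--     seen = set()
--     prev = None
--     for x in list_route:
--         if prev is None or x != prev:
--             if x in seen:
--                 return True
--             seen.add(x)
--             prev = x
--     return False
-- ===== Notes on version B (the rewrite author's own statement) =====
-- stated objective: faster
-- what changed: Replaced the triple-nested scan (for each element: count, index, then a while loop re-scanning slices) by a single pass that compresses consecutive duplicates and reports a value reappearing after a run of different values, using a seen-set.
import Mathlib
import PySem

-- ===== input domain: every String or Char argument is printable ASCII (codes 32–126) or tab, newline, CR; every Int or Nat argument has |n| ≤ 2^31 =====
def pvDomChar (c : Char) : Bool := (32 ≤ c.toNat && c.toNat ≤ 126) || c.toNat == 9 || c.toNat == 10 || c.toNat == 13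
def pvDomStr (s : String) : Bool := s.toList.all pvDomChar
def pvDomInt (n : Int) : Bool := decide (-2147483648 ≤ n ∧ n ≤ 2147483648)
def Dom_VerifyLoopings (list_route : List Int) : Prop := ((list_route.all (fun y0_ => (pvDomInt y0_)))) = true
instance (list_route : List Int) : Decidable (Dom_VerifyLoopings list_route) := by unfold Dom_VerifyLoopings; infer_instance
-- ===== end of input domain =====

-- B replaces A's triple-nested scan by a single pass over the consecutive-compressed list with a
-- seen-set (objective: faster). Both Pythons reverse list_route in place (same side effect);
-- the equivalence proved here is about the return value.

-- ===== PORT A =====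
-- the inner 'while(current_route_index < len-1): if(… != … and route in …[idx+1:]): return True; idx += 1'
def pvInnerA (m : List Int) (route : Int) (i : Nat) : Bool :=
  if i + 1 < m.length then
    if m.getD i 0 ≠ m.getD (i + 1) 0 ∧ route ∈ m.drop (i + 1) then true
    else pvInnerA m route (i + 1)
  else false
termination_by m.length - i

-- the outer 'for route in list(list_route):' (early return True propagates)
def pvOuterA (m : List Int) : List Int → Bool
  | [] => false
  | route :: rest =>
    if 1 < m.count route then
      match PySem.List.index? m route with
      | some i => if pvInnerA m route i then true else pvOuterA m rest
      | none => pvOuterA m rest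
    else pvOuterA m rest

def VerifyLoopings (list_route : List Int) : Bool :=
  let m := list_route.reverse
  pvOuterA m m

-- ===== PORT B =====
-- single pass: skip consecutive duplicates, answer True when a (run-starting) value was seen before
def pvAltLoop (seen : PySem.Set Int) (prev : Option Int) : List Int → Bool
  | [] => false
  | x :: rest =>
    if prev = none ∨ some x ≠ prev then
      if PySem.Set.contains seen x then true
      else pvAltLoop (PySem.Set.add seen x) (some x) rest
    else pvAltLoop seen prev rest

def VerifyLoopings_alt (list_route : List Int) : Bool :=
  pvAltLoop PySem.Set.empty none list_route.reverse

-- ===== PRECONDITION & SPEC =====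
def Spec_VerifyLoopings (list_route : List Int) (out : Bool) : Prop := out = VerifyLoopings_alt list_route
instance (list_route : List Int) (out : Bool) : Decidable (Spec_VerifyLoopings list_route out) := by unfold Spec_VerifyLoopings; infer_instance

-- ===== CLAIM (what is proved, stated in full; the proofs are below) =====
def Claim_equal_VerifyLoopings : Prop := ∀ (list_route : List Int), Dom_VerifyLoopings list_route → Spec_VerifyLoopings list_route (VerifyLoopings list_route)

-- ===== LEMMAS AND PROOFS =====

-- Both programs decide: does some value reappear after a different value (a "looping")?
def pvRep (m : List Int) : Prop := ∃ v w, v ≠ w ∧ [v, w, v].Sublist m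

-- consecutive-duplicate compression, with B's exact skip condition
def pvComp : Option Int → List Int → List Int
  | _, [] => []
  | prev, x :: r => if prev = none ∨ some x ≠ prev then x :: pvComp (some x) r else pvComp prev r

-- ---- A-side characterisation ----

lemma pvInnerA_iff_aux (k : Nat) : ∀ (m : List Int) (v : Int) (i : Nat), m.length - i ≤ k →
    (pvInnerA m v i = true ↔
      ∃ j, i ≤ j ∧ j + 1 < m.length ∧ m.getD j 0 ≠ m.getD (j + 1) 0 ∧ v ∈ m.drop (j + 1)) := by
  induction k with
  | zero =>
    intro m v i hk
    rw [pvInnerA]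
    have hlen : m.length ≤ i := by omega
    simp only [if_neg (by omega : ¬ i + 1 < m.length)]
    constructor
    · intro h; exact absurd h (by simp)
    · rintro ⟨j, hij, hj, _⟩; omega
  | succ k IH =>
    intro m v i hk
    rw [pvInnerA]
    by_cases hb : i + 1 < m.length
    · simp only [if_pos hb]
      by_cases hc : m.getD i 0 ≠ m.getD (i + 1) 0 ∧ v ∈ m.drop (i + 1)
      · simp only [if_pos hc]
        constructor
        · intro _; exact ⟨i, le_refl i, hb, hc.1, hc.2⟩
        · intro _; trivial
      · simp only [if_neg hc]
        rw [IH m v (i + 1) (by omega)]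
        constructor
        · rintro ⟨j, hij, h1, h2, h3⟩; exact ⟨j, by omega, h1, h2, h3⟩
        · rintro ⟨j, hij, h1, h2, h3⟩
          refine ⟨j, ?_, h1, h2, h3⟩
          rcases Nat.eq_or_lt_of_le hij with h | h
          · exact absurd (h ▸ ⟨h2, h3⟩) hc
          · omega
    · simp only [if_neg hb]
      constructor
      · intro h; exact absurd h (by simp)
      · rintro ⟨j, hij, hj, _⟩; omega

lemma pvInnerA_iff (m : List Int) (v : Int) (i : Nat) :
    pvInnerA m v i = true ↔
      ∃ j, i ≤ j ∧ j + 1 < m.length ∧ m.getD j 0 ≠ m.getD (j + 1) 0 ∧ v ∈ m.drop (j + 1) :=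
  pvInnerA_iff_aux m.length m v i (by omega)

lemma pvOuterA_iff (m : List Int) : ∀ r : List Int,
    (pvOuterA m r = true ↔
      ∃ v ∈ r, 1 < m.count v ∧ ∃ i, PySem.List.index? m v = some i ∧ pvInnerA m v i = true) := by
  intro r
  induction r with
  | nil => simp [pvOuterA]
  | cons x rest IH =>
    rw [pvOuterA]
    by_cases hc : 1 < m.count x
    · simp only [if_pos hc]
      cases hidx : PySem.List.index? m x with
      | some i =>
        by_cases hin : pvInnerA m x i = true
        · simp only [hin]
          constructor
          · intro _; exact ⟨x, List.mem_cons_self, hc, i, hidx, hin⟩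
          · intro _; trivial
        · simp only [hin]
          rw [if_neg (by simp), IH]
          constructor
          · rintro ⟨v, hv, h1, h2⟩; exact ⟨v, List.mem_cons_of_mem _ hv, h1, h2⟩
          · rintro ⟨v, hv, h1, j, h2, h3⟩
            rcases List.mem_cons.mp hv with rfl | hv
            · rw [hidx] at h2; cases h2; exact absurd h3 hin
            · exact ⟨v, hv, h1, j, h2, h3⟩
      | none =>
        rw [IH]
        constructor
        · rintro ⟨v, hv, h1, h2⟩; exact ⟨v, List.mem_cons_of_mem _ hv, h1, h2⟩
        · rintro ⟨v, hv, h1, j, h2, h3⟩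
          rcases List.mem_cons.mp hv with rfl | hv
          · rw [hidx] at h2; cases h2
          · exact ⟨v, hv, h1, j, h2, h3⟩
    · simp only [if_neg hc]
      rw [IH]
      constructor
      · rintro ⟨v, hv, h1, h2⟩; exact ⟨v, List.mem_cons_of_mem _ hv, h1, h2⟩
      · rintro ⟨v, hv, h1, h2⟩
        rcases List.mem_cons.mp hv with rfl | hv
        · exact absurd h1 hc
        · exact ⟨v, hv, h1, h2⟩

-- A returns true → a looping exists
lemma pvRep_of_A (m : List Int) (h : pvOuterA m m = true) : pvRep m := by
  rw [pvOuterA_iff] at h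
  obtain ⟨v, _, _, i, hidx, hinner⟩ := h
  obtain ⟨hi, hvi, _⟩ := PySem.List.getElem_of_index?_eq_some hidx
  rw [pvInnerA_iff] at hinner
  obtain ⟨j, hij, hj1, hne, hvdrop⟩ := hinner
  have hj : j < m.length := by omega
  have hgdj : m.getD j 0 = m[j] := List.getD_eq_getElem m 0 hj
  have hgdj1 : m.getD (j + 1) 0 = m[j + 1] := List.getD_eq_getElem m 0 hj1
  have hd1 : m.drop j = m[j] :: m.drop (j + 1) := List.drop_eq_getElem_cons hj
  have hd2 : m.drop (j + 1) = m[j + 1] :: m.drop (j + 2) := List.drop_eq_getElem_cons hj1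
  by_cases hjv : m[j] = v
  · -- the v at index j itself, then the change at j+1, then the later v
    have hne' : m[j + 1] ≠ v := by rw [hgdj, hgdj1, hjv] at hne; exact fun hq => hne hq.symm
    have hv2 : v ∈ m.drop (j + 2) := by
      rw [hd2] at hvdrop
      rcases List.mem_cons.mp hvdrop with hq | hq
      · exact absurd hq.symm hne'
      · exact hq
    refine ⟨v, m[j + 1], fun hq => hne' hq.symm, ?_⟩
    have s2 : [m[j + 1], v].Sublist (m.drop (j + 1)) := by
      rw [hd2]; exact (List.singleton_sublist.mpr hv2).cons₂ _
    have s3 : [v, m[j + 1], v].Sublist (m.drop j) := by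
      rw [hd1, hjv]; exact s2.cons₂ _
    exact s3.trans (List.drop_sublist j m)
  · -- the first v is before j (at index i), the change at j, then the later v
    have hij' : i < j := lt_of_le_of_ne hij (fun hq => hjv (hq ▸ hvi))
    have hvtake : v ∈ m.take j := by
      have hlt : i < (m.take j).length := by simp; omega
      have hq : (m.take j)[i]'hlt = m[i] := List.getElem_take
      rw [hvi] at hq
      rw [← hq]
      exact List.getElem_mem hlt
    have s1 : [v].Sublist (m.take j) := List.singleton_sublist.mpr hvtake
    have s2 : [m[j], v].Sublist (m.drop j) := by
      rw [hd1]; exact (List.singleton_sublist.mpr hvdrop).cons₂ _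
    refine ⟨v, m[j], fun hq => hjv hq.symm, ?_⟩
    have hq := (List.Sublist.append s1 s2)
    rw [List.take_append_drop] at hq
    exact hq

-- change-point: from a v at index i with [w,v] still to come, A's inner scan finds a witness
lemma pvChangePoint_aux (k : Nat) : ∀ (m : List Int) (v w : Int) (i : Nat), m.length - i ≤ k →
    i < m.length → m.getD i 0 = v → v ≠ w → [w, v].Sublist (m.drop (i + 1)) →
    ∃ j, i ≤ j ∧ j + 1 < m.length ∧ m.getD j 0 ≠ m.getD (j + 1) 0 ∧ v ∈ m.drop (j + 1) := by
  induction k with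
  | zero => intro m v w i hk hi _ _ _; omega
  | succ k IH =>
    intro m v w i hk hi hgd hvw hsub
    have hi1 : i + 1 < m.length := by
      by_contra hcon
      have hq : m.drop (i + 1) = [] := List.drop_eq_nil_iff.mpr (by omega)
      rw [hq] at hsub
      simp at hsub
    have hd : m.drop (i + 1) = m[i + 1] :: m.drop (i + 2) := List.drop_eq_getElem_cons hi1
    have hgd1 : m.getD (i + 1) 0 = m[i + 1] := List.getD_eq_getElem m 0 hi1
    by_cases h2 : m.getD (i + 1) 0 = v
    · -- still inside the run of v's: step forward
      rw [hd] at hsub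
      cases hsub with
      | cons₂ hq =>
        exact absurd (hgd1.symm.trans h2) (Ne.symm hvw)
      | cons _ hq =>
        obtain ⟨j, hj0, hj1, hj2, hj3⟩ := IH m v w (i + 1) (by omega) hi1 h2 hvw hq
        exact ⟨j, by omega, hj1, hj2, hj3⟩
    · -- change point found at i
      exact ⟨i, le_refl i, hi1, by rw [hgd]; exact fun hq => h2 hq.symm,
        hsub.subset (by simp)⟩

-- a looping exists → A returns true
lemma pvA_of_Rep (m : List Int) (h : pvRep m) : pvOuterA m m = true := by
  obtain ⟨v, w, hvw, hsub⟩ := h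
  rw [pvOuterA_iff]
  have hvm : v ∈ m := hsub.subset (by simp)
  have hcount : 1 < m.count v := by
    have hvv : (List.replicate 2 v).Sublist [v, w, v] :=
      ((List.sublist_cons_self w [v]).cons₂ v)
    have hq := List.replicate_sublist_iff.mp (hvv.trans hsub)
    omega
  have hsome : PySem.List.index? m v ≠ none := by
    intro hq
    exact ((PySem.List.index?_eq_none_iff m v).mp hq) hvm
  obtain ⟨i0, hidx⟩ := Option.ne_none_iff_exists'.mp hsome
  obtain ⟨hi0, hv0, hmin⟩ := PySem.List.getElem_of_index?_eq_some hidx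
  -- split m around the first element of the [v,w,v] pattern
  obtain ⟨r1, r2, hm, hs1, hs2⟩ :=
    List.append_sublist_iff.mp (show ([v] ++ [w, v]).Sublist m from hsub)
  have hvr1 : v ∈ r1 := List.singleton_sublist.mp hs1
  obtain ⟨i2, hil, hgi2⟩ := List.getElem_of_mem hvr1
  have hi2m : i2 < m.length := by rw [hm, List.length_append]; omega
  have hmi2 : m[i2]'hi2m = v := by
    subst hm
    rw [List.getElem_append_left hil]
    exact hgi2
  have hgd : m.getD i2 0 = v := by rw [List.getD_eq_getElem m 0 hi2m]; exact hmi2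
  have hwv : [w, v].Sublist (m.drop (i2 + 1)) := by
    have hdm : m.drop (i2 + 1) = r1.drop (i2 + 1) ++ r2 := by
      rw [hm]; exact List.drop_append_of_le_length (by omega)
    rw [hdm]
    exact hs2.trans (List.sublist_append_right _ _)
  obtain ⟨j, hji2, hj1, hne, hmem⟩ :=
    pvChangePoint_aux m.length m v w i2 (by omega) hi2m hgd hvw hwv
  have hi0i2 : i0 ≤ i2 := by
    by_contra hcon
    exact hmin i2 (by omega) hmi2
  refine ⟨v, hvm, hcount, i0, hidx, ?_⟩
  rw [pvInnerA_iff]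
  exact ⟨j, by omega, hj1, hne, hmem⟩

-- ---- B-side characterisation ----

lemma pvAltLoop_iff : ∀ (m : List Int) (seen : PySem.Set Int) (prev : Option Int),
    (pvAltLoop seen prev m = true ↔
      ¬ ((pvComp prev m).Nodup ∧ ∀ x ∈ pvComp prev m, x ∉ seen)) := by
  intro m
  induction m with
  | nil => intro seen prev; simp [pvAltLoop, pvComp]
  | cons x r IH =>
    intro seen prev
    rw [pvAltLoop, pvComp]
    by_cases hc : prev = none ∨ some x ≠ prev
    · rw [if_pos hc, if_pos hc]
      by_cases hs : PySem.Set.contains seen x = true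
      · have hx : x ∈ seen := (PySem.Set.contains_iff seen x).mp hs
        rw [if_pos hs]
        constructor
        · rintro _ ⟨_, hall⟩; exact hall x List.mem_cons_self hx
        · intro _; trivial
      · have hx : x ∉ seen := fun hq => hs ((PySem.Set.contains_iff seen x).mpr hq)
        rw [if_neg hs, IH]
        simp only [List.nodup_cons, List.mem_cons, PySem.Set.mem_add]
        constructor
        · intro hq hcontra
          apply hq
          obtain ⟨⟨hxL, hnd⟩, hall⟩ := hcontra
          refine ⟨hnd, fun y hy hmm => ?_⟩
          rcases hmm with hy2 | rfl
          · exact hall y (Or.inr hy) hy2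
          · exact hxL hy
        · intro hq hcontra
          apply hq
          obtain ⟨hnd, hall⟩ := hcontra
          refine ⟨⟨fun hxL => hall x hxL (Or.inr rfl), hnd⟩, fun y hy => ?_⟩
          rcases hy with rfl | hy
          · exact hx
          · exact fun hys => hall y hy (Or.inl hys)
    · rw [if_neg hc, if_neg hc]
      exact IH seen prev

lemma pvComp_sublist : ∀ (prev : Option Int) (m : List Int), (pvComp prev m).Sublist m := by
  intro prev m
  induction m generalizing prev with
  | nil => simp [pvComp]
  | cons x r IH =>
    rw [pvComp]
    by_cases hc : prev = none ∨ some x ≠ prev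
    · rw [if_pos hc]; exact (IH (some x)).cons₂ x
    · rw [if_neg hc]; exact (IH prev).cons x

lemma pvComp_head?_ne (a : Int) (m : List Int) : (pvComp (some a) m).head? ≠ some a := by
  induction m with
  | nil => simp [pvComp]
  | cons x r IH =>
    rw [pvComp]
    by_cases hc : (some a : Option Int) = none ∨ some x ≠ some a
    · rw [if_pos hc]
      have hxa : x ≠ a := by
        rcases hc with hq | hq
        · exact absurd hq (by simp)
        · exact fun hq2 => hq (by rw [hq2])
      simpa using hxa
    · rw [if_neg hc]; exact IH

lemma pvComp_chain : ∀ (m : List Int) (prev : Option Int), (pvComp prev m).IsChain (· ≠ ·) := by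
  intro m
  induction m with
  | nil => intro prev; simp [pvComp]
  | cons x r IH =>
    intro prev
    rw [pvComp]
    by_cases hc : prev = none ∨ some x ≠ prev
    · rw [if_pos hc]
      rcases hL : pvComp (some x) r with _ | ⟨y, t⟩
      · simp
      · have hy : y ≠ x := by
          have hq := pvComp_head?_ne x r
          rw [hL] at hq
          simpa using hq
        rw [List.isChain_cons_cons]
        exact ⟨Ne.symm hy, hL ▸ IH (some x)⟩
    · rw [if_neg hc]; exact IH prev

lemma pvMem_comp : ∀ (m : List Int) (prev : Option Int) (v : Int),
    v ∈ m → some v ≠ prev → v ∈ pvComp prev m := by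
  intro m
  induction m with
  | nil => intro prev v hv; simp at hv
  | cons x r IH =>
    intro prev v hv hne
    rw [pvComp]
    by_cases hc : prev = none ∨ some x ≠ prev
    · rw [if_pos hc]
      by_cases hvx : v = x
      · exact hvx ▸ List.mem_cons_self
      · refine List.mem_cons_of_mem _ (IH (some x) v ?_ (by simpa using hvx))
        rcases List.mem_cons.mp hv with rfl | hq
        · exact absurd rfl hvx
        · exact hq
    · rw [if_neg hc]
      have hxp : some x = prev := by
        by_contra hq
        exact hc (Or.inr hq)
      rcases List.mem_cons.mp hv with rfl | hq
      · exact absurd hxp hne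
      · exact IH prev v hq hne

lemma pvMem_comp_self : ∀ (m : List Int) (v w : Int),
    v ≠ w → [w, v].Sublist m → v ∈ pvComp (some v) m := by
  intro m
  induction m with
  | nil => intro v w _ hs; simp at hs
  | cons x r IH =>
    intro v w hvw hs
    rw [pvComp]
    by_cases hx : x = v
    · rw [if_neg (by simp [hx])]
      cases hs with
      | cons _ hq => exact IH v w hvw hq
      | cons₂ hq => exact absurd hx.symm hvw
    · rw [if_pos (Or.inr (by simpa using hx))]
      have hvr : v ∈ r := by
        have hq : v ∈ x :: r := hs.subset (by simp)
        rcases List.mem_cons.mp hq with rfl | hq2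
        · exact absurd rfl hx
        · exact hq2
      exact List.mem_cons_of_mem _ (pvMem_comp r (some x) v hvr (by simpa [eq_comm] using hx))

lemma pvNot_nodup_comp : ∀ (m : List Int) (prev : Option Int) (v w : Int),
    v ≠ w → [v, w, v].Sublist m → prev ≠ some v → ¬ (pvComp prev m).Nodup := by
  intro m
  induction m with
  | nil => intro prev v w _ hs; simp at hs
  | cons x r IH =>
    intro prev v w hvw hs hprev
    rw [pvComp]
    by_cases hc : prev = none ∨ some x ≠ prev
    · rw [if_pos hc]
      by_cases hx : x = v
      · subst hx
        have hwx : [w, x].Sublist r := by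
          cases hs with
          | cons₂ _ hq => exact hq
          | cons _ hq => exact ((List.sublist_cons_self x [w, x]).trans hq)
        have hmem : x ∈ pvComp (some x) r := pvMem_comp_self r x w hvw hwx
        intro hnd
        exact (List.nodup_cons.mp hnd).1 hmem
      · have hsr : [v, w, v].Sublist r := by
          cases hs with
          | cons _ hq => exact hq
          | cons₂ hq => exact absurd rfl hx
        intro hnd
        exact IH (some x) v w hvw hsr (by simpa [eq_comm] using hx) hnd.of_cons
    · rw [if_neg hc]
      have hxp : some x = prev := by
        by_contra hq
        exact hc (Or.inr hq)
      have hsr : [v, w, v].Sublist r := by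
        cases hs with
        | cons _ hq => exact hq
        | cons₂ hq => exact absurd hxp.symm hprev
      exact IH prev v w hvw hsr hprev

-- in an adjacent-distinct list, a duplicated value yields a loop pattern
lemma pvRep_of_dd : ∀ (L : List Int) (a : Int), L.IsChain (· ≠ ·) → [a, a].Sublist L →
    ∃ v w, v ≠ w ∧ [v, w, v].Sublist L := by
  intro L
  induction L with
  | nil => intro a _ hs; simp at hs
  | cons x r IH =>
    intro a hch hs
    cases hs with
    | cons _ hq =>
      obtain ⟨v, w, hvw, hsw⟩ := IH a hch.of_cons hq
      exact ⟨v, w, hvw, hsw.cons x⟩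
    | cons₂ _ hq =>
      have har : x ∈ r := List.singleton_sublist.mp hq
      cases r with
      | nil => simp at har
      | cons y t =>
        have hay : x ≠ y := (List.isChain_cons_cons.mp hch).1
        have hat : x ∈ t := by
          rcases List.mem_cons.mp har with rfl | hq2
          · exact absurd rfl hay
          · exact hq2
        exact ⟨x, y, hay, ((List.singleton_sublist.mpr hat).cons₂ y).cons₂ x⟩

lemma pvRep_of_not_nodup : ∀ (L : List Int), L.IsChain (· ≠ ·) → ¬ L.Nodup →
    ∃ v w, v ≠ w ∧ [v, w, v].Sublist L := by
  intro L hch hnd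
  obtain ⟨a, hdup⟩ := List.exists_duplicate_iff_not_nodup.mpr hnd
  exact pvRep_of_dd L a hch (List.duplicate_iff_sublist.mp hdup)

lemma pvB_iff_Rep (m : List Int) : pvAltLoop PySem.Set.empty none m = true ↔ pvRep m := by
  rw [pvAltLoop_iff]
  have hempty : ∀ x ∈ pvComp none m, x ∉ (PySem.Set.empty : PySem.Set Int) := by
    intro x _ hx
    simp [PySem.Set.empty] at hx
  constructor
  · intro h
    have hnd : ¬ (pvComp none m).Nodup := fun hnd => h ⟨hnd, hempty⟩
    obtain ⟨v, w, hvw, hs⟩ := pvRep_of_not_nodup _ (pvComp_chain m none) hnd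
    exact ⟨v, w, hvw, hs.trans (pvComp_sublist none m)⟩
  · rintro ⟨v, w, hvw, hs⟩ ⟨hnd, _⟩
    exact pvNot_nodup_comp m none v w hvw hs (by simp) hnd

-- ===== VERDICT (by name: the statement is the Claim_ definition above) =====
theorem VerifyLoopings_spec : Claim_equal_VerifyLoopings := by
  intro l _
  unfold Spec_VerifyLoopings VerifyLoopings VerifyLoopings_alt
  rw [Bool.eq_iff_iff, pvB_iff_Rep]
  constructor
  · exact pvRep_of_A _
  · exact pvA_of_Rep _
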